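-- pv_equiv track=rewrite | github.com/JiayinChen-Jen/Algorithms | heap.py | increase_val
-- ===== SOURCE A (Python) =====
-- def increase_val(heap, key, val):
-- 	"""Increase the value of the element heap[key]"""
-- 	if val < heap[key]:
-- 		raise ValueError('new key is smaller than current key')
-- 	heap[key] = val
-- 	parentInd = get_parent(key)
-- 	while key > 0 and heap[parentInd] < heap[key]:
-- 		heap[parentInd], heap[key] = heap[key], heap[parentInd]
-- 		key = parentInd
-- 		parentInd = get_parent(key)
-- 	return heap
--
-- def get_parent(key):
-- 	"""Index of parent."""
-- 	if key%2 == 0: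
-- 		parent = int(key/2)-1
-- 	else:
-- 		parent = int(key/2)
-- 	return parent
-- ===== SOURCE B (Python) =====
-- def increase_val(heap, key, val):
-- 	"""Increase the value of the element heap[key]"""
-- 	if val < heap[key]:
-- 		raise ValueError('new key is smaller than current key')
-- 	# plan-then-apply: build the full ancestor chain, count how far val rises,
-- 	# compute the list of writes, then apply them in one pass
-- 	chain = [key]
-- 	while chain[-1] > 0:
-- 		chain.append(get_parent(chain[-1]))
-- 	k = 0
-- 	while k + 1 < len(chain) and heap[chain[k + 1]] < val:
-- 		k += 1
-- 	moves = [(chain[j], heap[chain[j + 1]]) for j in range(k)] + [(chain[k], val)]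
-- 	for i, v in moves:
-- 		heap[i] = v
-- 	return heap
--
-- def get_parent(key):
-- 	"""Index of parent."""
-- 	if key%2 == 0:
-- 		parent = int(key/2)-1
-- 	else:
-- 		parent = int(key/2)
-- 	return parent
-- ===== Notes on version B (the rewrite author's own statement) =====
-- stated objective: alternative
-- what changed: Replaces the in-place swap loop with a plan-then-apply scheme: first build the full ancestor chain, then count how many chain ancestors are smaller than val, then compute the whole list of (index, value) writes, and finally apply them in one pass.
import Mathlib
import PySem

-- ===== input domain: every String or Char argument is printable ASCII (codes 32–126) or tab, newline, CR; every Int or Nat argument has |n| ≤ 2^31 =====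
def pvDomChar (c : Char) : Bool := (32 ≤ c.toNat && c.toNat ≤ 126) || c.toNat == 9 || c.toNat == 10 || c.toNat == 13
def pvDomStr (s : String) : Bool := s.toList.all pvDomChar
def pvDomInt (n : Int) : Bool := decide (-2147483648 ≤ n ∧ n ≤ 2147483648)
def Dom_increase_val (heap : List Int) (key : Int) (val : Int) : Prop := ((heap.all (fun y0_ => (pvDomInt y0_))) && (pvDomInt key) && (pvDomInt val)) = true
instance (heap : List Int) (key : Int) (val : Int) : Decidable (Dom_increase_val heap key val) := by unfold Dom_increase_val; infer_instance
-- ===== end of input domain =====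

-- B replaces A's in-place swap loop by a plan-then-apply scheme (build the ancestor chain,
-- count how far val rises, compute the list of writes, apply them); return value proved equal,
-- both Pythons mutate `heap` in place and end in the same final state.


-- ===== PORT A =====
-- get_parent: `int(key/2)` truncates toward zero, exact as Int.truncdiv
def get_parent (key : Int) : Int :=
  if PySem.Int.mod key 2 = 0 then PySem.Int.truncdiv key 2 - 1 else PySem.Int.truncdiv key 2

theorem get_parent_bounds (key : Int) (h : 0 < key) :
    0 ≤ get_parent key ∧ get_parent key < key := by
  unfold get_parent
  rw [PySem.Int.mod_eq_emod_of_pos (b := 2) (by norm_num)]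
  have ht : PySem.Int.truncdiv key 2 = key / 2 := by
    exact Int.tdiv_eq_ediv_of_nonneg (by omega)
  rw [ht]; split <;> omega

-- A's while loop: swap heap[parent] and heap[key] while the parent is smaller; heap[key] = val
-- has already been written before the loop starts.
def increase_val_loop (heap : List Int) (key : Int) : List Int :=
  if hk : 0 < key then
    let p := get_parent key
    if PySem.List.pyGetD heap p 0 < PySem.List.pyGetD heap key 0 then
      increase_val_loop
        (PySem.List.pySetD (PySem.List.pySetD heap p (PySem.List.pyGetD heap key 0)) key
          (PySem.List.pyGetD heap p 0)) p
    else heap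
  else heap
termination_by key.toNat
decreasing_by
  have := get_parent_bounds key hk
  omega

def increase_val (heap : List Int) (key : Int) (val : Int) : List Int :=
  match PySem.List.pyGet? heap key with
  | none => []        -- IndexError on heap[key]; excluded by Pre_
  | some cur =>
    if val < cur then []   -- ValueError; excluded by Pre_
    else increase_val_loop (PySem.List.pySetD heap key val) key

-- ===== PORT B =====
-- chain = [key]; while chain[-1] > 0: chain.append(get_parent(chain[-1]))   (same list, built recursively)
def build_chain (c : Int) : List Int :=
  if h : 0 < c then c :: build_chain (get_parent c) else [c]
termination_by c.toNat
decreasing_by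
  have := get_parent_bounds c h
  omega

-- k = 0; while k + 1 < len(chain) and heap[chain[k+1]] < val: k += 1
def find_k (heap : List Int) (val : Int) (chain : List Int) (k : Nat) : Nat :=
  if _ : k + 1 < chain.length then
    if PySem.List.pyGetD heap (chain.getD (k+1) 0) 0 < val then
      find_k heap val chain (k+1)
    else k
  else k
termination_by chain.length - k

-- moves = [(chain[j], heap[chain[j+1]]) for j in range(k)] + [(chain[k], val)]
def mk_moves (heap : List Int) (chain : List Int) (val : Int) (k : Nat) : List (Int × Int) :=
  (List.range k).map
    (fun j => (chain.getD j 0, PySem.List.pyGetD heap (chain.getD (j+1) 0) 0))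
    ++ [(chain.getD k 0, val)]

-- for i, v in moves: heap[i] = v
def apply_moves (heap : List Int) (moves : List (Int × Int)) : List Int :=
  moves.foldl (fun h m => PySem.List.pySetD h m.1 m.2) heap

def increase_val_alt (heap : List Int) (key : Int) (val : Int) : List Int :=
  match PySem.List.pyGet? heap key with
  | none => []        -- IndexError on heap[key]; excluded by Pre_
  | some cur =>
    if val < cur then []   -- ValueError; excluded by Pre_
    else
      let chain := build_chain key
      apply_moves heap (mk_moves heap chain val (find_k heap val chain 0))

-- ===== PRECONDITION & SPEC =====
-- Pre_ excludes exactly the inputs where A raises: key out of Python index range (IndexError)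
-- and val < heap[key] (explicit ValueError).
def Pre_increase_val (heap : List Int) (key : Int) (val : Int) : Prop :=
  PySem.Raise.InRange heap.length key ∧ PySem.List.pyGetD heap key 0 ≤ val
instance (heap : List Int) (key : Int) (val : Int) : Decidable (Pre_increase_val heap key val) := by
  unfold Pre_increase_val; infer_instance

def pvWitness_increase_val : List Int × Int × Int := ([9, 4, 7, 1], 3, 10)

def Spec_increase_val (heap : List Int) (key : Int) (val : Int) (out : List Int) : Prop :=
  out = increase_val_alt heap key val
instance (heap : List Int) (key : Int) (val : Int) (out : List Int) :
    Decidable (Spec_increase_val heap key val out) := by unfold Spec_increase_val; infer_instance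

-- ===== CLAIM (what is proved, stated in full; the proofs are below) =====
def Claim_equal_increase_val : Prop := ∀ (heap : List Int) (key : Int) (val : Int),
  Dom_increase_val heap key val → Pre_increase_val heap key val →
  Spec_increase_val heap key val (increase_val heap key val)

-- ===== LEMMAS AND PROOFS =====

theorem build_chain_head (c : Int) : ∃ t, build_chain c = c :: t := by
  rw [build_chain.eq_def]; split
  · exact ⟨_, rfl⟩
  · exact ⟨[], rfl⟩

theorem build_chain_mem (c : Int) (hc : 0 ≤ c) : ∀ i ∈ build_chain c, 0 ≤ i ∧ i ≤ c := by
  induction c using build_chain.induct with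
  | case1 c h ih =>
    intro i hi
    rw [build_chain.eq_def, dif_pos h] at hi
    obtain ⟨hb1, hb2⟩ := get_parent_bounds c h
    rcases List.mem_cons.mp hi with rfl | hi
    · omega
    · have := ih hb1 i hi; omega
  | case2 c h =>
    intro i hi
    rw [build_chain.eq_def, dif_neg h] at hi
    simp at hi; omega

theorem build_chain_getD_bounds (c : Int) (hc : 0 ≤ c) (j : Nat) :
    0 ≤ (build_chain c).getD j 0 ∧ (build_chain c).getD j 0 ≤ c := by
  by_cases h : j < (build_chain c).length
  · rw [List.getD_eq_getElem _ _ h]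
    exact build_chain_mem c hc _ (List.getElem_mem h)
  · rw [List.getD_eq_default _ _ (by omega)]; omega

theorem find_k_shift (heap : List Int) (val : Int) (x : Int) (c : List Int) :
    ∀ k, find_k heap val (x :: c) (k + 1) = find_k heap val c k + 1 := by
  intro k
  induction hn : c.length - k using Nat.strong_induction_on generalizing k with
  | _ n ih =>
    rw [find_k.eq_def, find_k.eq_def (chain := c)]
    simp only [List.length_cons]
    by_cases h : k + 1 < c.length
    · rw [dif_pos (by omega), dif_pos h]
      have hg : (x :: c).getD (k + 1 + 1) 0 = c.getD (k + 1) 0 := by simp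
      rw [hg]
      split
      · exact ih (c.length - (k + 1)) (by omega) (k + 1) rfl
      · rfl
    · rw [dif_neg (by omega), dif_neg h]

theorem find_k_congr (h1 h2 : List Int) (val : Int) (chain : List Int)
    (H : ∀ j : Nat, PySem.List.pyGetD h1 (chain.getD j 0) 0 = PySem.List.pyGetD h2 (chain.getD j 0) 0) :
    ∀ k, find_k h1 val chain k = find_k h2 val chain k := by
  intro k
  induction hn : chain.length - k using Nat.strong_induction_on generalizing k with
  | _ n ih =>
    rw [find_k.eq_def, find_k.eq_def (heap := h2)]
    split
    · rw [H (k+1)]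
      split
      · exact ih (chain.length - (k + 1)) (by omega) (k + 1) rfl
      · rfl
    · rfl

theorem mk_moves_congr (h1 h2 : List Int) (val : Int) (chain : List Int) (k : Nat)
    (H : ∀ j : Nat, PySem.List.pyGetD h1 (chain.getD j 0) 0 = PySem.List.pyGetD h2 (chain.getD j 0) 0) :
    mk_moves h1 chain val k = mk_moves h2 chain val k := by
  unfold mk_moves
  congr 1
  exact List.map_congr_left (fun j _ => by rw [H (j+1)])

-- Main invariant: A's loop on the heap with val already written at key equals B's
-- plan-then-apply result on the untouched heap.
theorem loop_eq (n : Nat) : ∀ (key : Int) (heap : List Int) (val : Int),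
    key.toNat ≤ n → 0 ≤ key → key < (heap.length : Int) →
    increase_val_loop (PySem.List.pySetD heap key val) key =
      apply_moves heap
        (mk_moves heap (build_chain key) val (find_k heap val (build_chain key) 0)) := by
  induction n with
  | zero =>
    intro key heap val hn h0 _
    have hk : key = 0 := by omega
    subst hk
    rw [increase_val_loop.eq_def, build_chain.eq_def]
    simp only [dif_neg (by omega : ¬ (0:Int) < 0)]
    rw [find_k.eq_def]
    simp [mk_moves, apply_moves]
  | succ n ih =>
    intro key heap val hn h0 hlen
    by_cases hk : 0 < key
    · obtain ⟨hp0, hpk⟩ := get_parent_bounds key hk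
      set p := get_parent key with hp
      have hklen : key.toNat < heap.length := by omega
      have hkey : key = ((key.toNat : Nat) : Int) := by omega
      have hpnat : p = ((p.toNat : Nat) : Int) := by omega
      have hne : p.toNat ≠ key.toNat := by omega
      -- the chain decomposes
      have hchain : build_chain key = key :: build_chain p := by
        rw [build_chain.eq_def, dif_pos hk]
      obtain ⟨t, ht⟩ := build_chain_head p
      have hget1 : (build_chain key).getD 1 0 = p := by rw [hchain, ht]; rfl
      -- reads on A's first-step heap
      have hget_key : PySem.List.pyGetD (PySem.List.pySetD heap key val) key 0 = val := by
        rw [hkey, PySem.List.pyGetD_pySetD_natCast _ _ _ _ _ hklen]; simp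
      have hget_p : PySem.List.pyGetD (PySem.List.pySetD heap key val) p 0 =
          PySem.List.pyGetD heap p 0 := by
        rw [hkey, hpnat, PySem.List.pyGetD_pySetD_natCast _ _ _ _ _ hklen]
        simp [hne]
      -- unfold one step of A's loop
      rw [increase_val_loop.eq_def]
      simp only [dif_pos hk, ← hp, hget_key, hget_p]
      -- unfold one step of B's counter
      have hlen2 : 1 < (build_chain key).length := by
        rw [hchain, ht]; simp
      rw [find_k.eq_def]
      simp only [dif_pos (by omega : 0 + 1 < (build_chain key).length), zero_add, hget1]
      by_cases hcond : PySem.List.pyGetD heap p 0 < val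
      · simp only [if_pos hcond]
        -- heap' : heap with heap[p] shifted down into position key
        set heap' := PySem.List.pySetD heap key (PySem.List.pyGetD heap p 0) with hheap'
        -- reads at indices in [0, p] are unchanged in heap'
        have hread : ∀ i : Int, 0 ≤ i → i ≤ p →
            PySem.List.pyGetD heap i 0 = PySem.List.pyGetD heap' i 0 := by
          intro i hi1 hi2
          rw [hheap', hkey, (by omega : i = ((i.toNat : Nat) : Int)),
            PySem.List.pyGetD_pySetD_natCast _ _ _ _ _ hklen]
          simp
          intro hcontra
          exact absurd hcontra (by omega)
        have Hc : ∀ j : Nat, PySem.List.pyGetD heap ((build_chain p).getD j 0) 0 =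
            PySem.List.pyGetD heap' ((build_chain p).getD j 0) 0 := by
          intro j
          obtain ⟨hb1, hb2⟩ := build_chain_getD_bounds p hp0 j
          exact hread _ hb1 hb2
        -- A's next heap is heap' with val written at p
        have hstep :
            PySem.List.pySetD (PySem.List.pySetD (PySem.List.pySetD heap key val) p val) key
              (PySem.List.pyGetD heap p 0) = PySem.List.pySetD heap' p val := by
          rw [hheap', PySem.List.pySetD_of_nonneg _ _ h0, PySem.List.pySetD_of_nonneg _ _ hp0,
            PySem.List.pySetD_of_nonneg _ _ h0, PySem.List.pySetD_of_nonneg _ _ h0,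
            PySem.List.pySetD_of_nonneg _ _ hp0]
          rw [List.set_comm _ _ (by omega : p.toNat ≠ key.toNat)]
          rw [List.set_set]
        rw [hstep]
        -- B's counter: shift off the head of the chain
        have hk' : find_k heap val (build_chain key) 1 =
            find_k heap val (build_chain p) 0 + 1 := by
          rw [hchain]
          exact find_k_shift heap val key (build_chain p) 0
        rw [hk']
        set k' := find_k heap val (build_chain p) 0 with hkdef
        -- B's moves: first move is (key, heap[p]); the rest are p's moves
        have hmoves : mk_moves heap (build_chain key) val (k' + 1) =
            (key, PySem.List.pyGetD heap p 0) :: mk_moves heap (build_chain p) val k' := by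
          unfold mk_moves
          rw [List.range_succ_eq_map]
          simp only [List.map_cons, List.map_map]
          rw [hchain]
          simp only [List.getD_cons_zero, List.getD_cons_succ, zero_add]
          have : (build_chain p).getD 0 0 = p := by rw [ht]; rfl
          rw [this]
          rfl
        rw [hmoves]
        -- apply the first move, then use the IH at p
        have happly : apply_moves heap
            ((key, PySem.List.pyGetD heap p 0) :: mk_moves heap (build_chain p) val k') =
            apply_moves heap' (mk_moves heap' (build_chain p) val k') := by
          unfold apply_moves
          rw [List.foldl_cons, ← hheap',
            mk_moves_congr heap heap' val (build_chain p) k' Hc]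
        rw [happly, hkdef, find_k_congr heap heap' val (build_chain p) Hc 0]
        exact ih p heap' val (by omega) hp0
          (by rw [hheap', PySem.List.length_pySetD]; omega)
      · simp only [if_neg hcond]
        -- loop stops at once; B's k is 0 and the single move writes val at key
        rw [hchain]
        simp [mk_moves, apply_moves]
    · -- key = 0 (since 0 ≤ key)
      have hk0 : key = 0 := by omega
      subst hk0
      rw [increase_val_loop.eq_def, build_chain.eq_def]
      simp only [dif_neg (by omega : ¬ (0:Int) < 0)]
      rw [find_k.eq_def]
      simp [mk_moves, apply_moves]

theorem increase_val_spec : Claim_equal_increase_val := by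
  intro heap key val _ hpre
  obtain ⟨hrange, hle⟩ := hpre
  unfold Spec_increase_val increase_val increase_val_alt
  obtain ⟨cur, hcur⟩ : ∃ cur, PySem.List.pyGet? heap key = some cur := by
    rcases h : PySem.List.pyGet? heap key with _ | cur
    · exact absurd ((PySem.List.pyGet?_eq_none_iff _ _).mp h) (by simp [hrange])
    · exact ⟨cur, rfl⟩
  simp only [hcur]
  have hcurval : cur ≤ val := by
    have : PySem.List.pyGetD heap key 0 = cur := by simp [PySem.List.pyGetD, hcur]
    omega
  simp only [if_neg (by omega : ¬ val < cur)]
  by_cases h0 : 0 ≤ key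
  · have hlen : key < (heap.length : Int) := hrange.2
    exact loop_eq key.toNat key heap val le_rfl h0 hlen
  · -- negative key: A is a single write; B's chain is [key], k = 0, moves = [(key, val)]
    rw [increase_val_loop.eq_def]
    simp only [dif_neg (by omega : ¬ 0 < key)]
    rw [build_chain.eq_def]
    simp only [dif_neg (by omega : ¬ 0 < key)]
    rw [find_k.eq_def]
    simp [mk_moves, apply_moves]
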